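-- pv_equiv track=rewrite | github.com/sunjae98/Algorithm-study | week11/3_250137/김선재_250137.py | solution
-- ===== SOURCE A (Python) =====
-- from collections import defaultdict
--
-- def solution(id_list, report, k):
--     answer = []
--
--     report = set(report) # 중복 제거
--     report_cnt = defaultdict(int) # 신고 횟수
--     report_list = defaultdict(list) # 신고 리스트
--
--     # 유저(key), (회수,리스트)value 매핑
--     for i in report:
--         a, b = i.split()
--         report_list[a].append(b)
--         report_cnt[b] += 1
--
--     # 전체 유저 목록
--     for id in id_list:
--         result = 0
--         for i in report_list[id]:
--             if report_cnt[i] >= k: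
--                 result += 1
--
--         answer.append(result)
--
--     return answer
-- ===== SOURCE B (Python) =====
-- def solution(id_list, report, k):
--     edges = [r.split() for r in dict.fromkeys(report)]
--     cnt = {}
--     for a, b in edges:
--         cnt[b] = cnt.get(b, 0) + 1
--     banned = {u for u, c in cnt.items() if c >= k}
--     mail = {}
--     for a, b in edges:
--         if b in banned:
--             mail[a] = mail.get(a, 0) + 1
--     return [mail.get(i, 0) for i in id_list]
-- ===== Notes on version B (the rewrite author's own statement) =====
-- stated objective: alternative
-- what changed: Replaces A's per-user adjacency dict (report_list) and nested per-id scan with a banned set computed from the counter plus a single pass over the deduped report edges accumulating a mail counter, then a final lookup per id.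
import Mathlib
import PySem

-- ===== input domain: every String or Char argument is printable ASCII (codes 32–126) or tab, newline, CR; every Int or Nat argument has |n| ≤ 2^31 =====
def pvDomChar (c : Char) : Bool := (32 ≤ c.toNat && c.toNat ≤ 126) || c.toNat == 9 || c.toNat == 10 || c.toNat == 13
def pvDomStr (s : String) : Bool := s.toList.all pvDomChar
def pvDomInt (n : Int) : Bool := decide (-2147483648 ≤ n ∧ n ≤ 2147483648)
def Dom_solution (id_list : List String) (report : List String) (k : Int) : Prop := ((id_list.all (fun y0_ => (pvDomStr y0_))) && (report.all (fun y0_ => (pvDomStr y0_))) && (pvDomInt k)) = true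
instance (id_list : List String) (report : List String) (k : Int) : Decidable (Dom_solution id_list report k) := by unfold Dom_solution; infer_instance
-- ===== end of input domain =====

-- B replaces A's per-user adjacency dict and nested per-id scan by a banned set plus a single
-- counting pass over the deduped report edges (objective: alternative decomposition, same cost class).

-- ===== PORT A =====
def solution (id_list : List String) (report : List String) (k : Int) : List Int :=
  let rep := PySem.Set.ofList report
  let st := rep.foldl
    (fun (st : PySem.Dict String (List String) × PySem.Dict String Int) i =>
      match PySem.Str.split₀ i with
      | [a, b] => (st.1.modify a [] (· ++ [b]), st.2.modify b 0 (· + 1))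
      | _ => st)  -- 'a, b = i.split()' raises ValueError here; such inputs are excluded by Pre_
    (PySem.Dict.empty, PySem.Dict.empty)
  id_list.foldl
    (fun ans id =>
      ans ++ [(st.1.getD id []).foldl (fun r i => if st.2.getD i 0 ≥ k then r + 1 else r) (0 : Int)])
    []

-- ===== PORT B =====
def solution_alt (id_list : List String) (report : List String) (k : Int) : List Int :=
  let edges := (PySem.List.dedup report).map PySem.Str.split₀
  let cnt := edges.foldl
    (fun (c : PySem.Dict String Int) e =>
      -- tuple unpacking 'a, b = e' ported by hand: exact for length-2 lists;
      -- other lengths raise ValueError in Python (excluded by Pre_)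
      if e.length = 2 then c.insert (e.getD 1 "") (c.getD (e.getD 1 "") 0 + 1) else c)
    PySem.Dict.empty
  let banned : PySem.Set String :=
    PySem.Set.ofList ((cnt.items.filter (fun p => decide (p.2 ≥ k))).map (·.1))
  let mail := edges.foldl
    (fun (m : PySem.Dict String Int) e =>
      if e.length = 2 then
        (if banned.contains (e.getD 1 "") then m.insert (e.getD 0 "") (m.getD (e.getD 0 "") 0 + 1) else m)
      else m)
    PySem.Dict.empty
  id_list.map (fun i => mail.getD i 0)

-- ===== PRECONDITION & SPEC =====
-- Pre_ excludes reports that do not split into exactly two whitespace-separated tokens: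
-- on those, 'a, b = i.split()' raises ValueError in A (and B's tuple unpacking raises too).
def Pre_solution (id_list : List String) (report : List String) (k : Int) : Prop :=
  ∀ s ∈ report, (PySem.Str.split₀ s).length = 2
instance (id_list : List String) (report : List String) (k : Int) : Decidable (Pre_solution id_list report k) := by unfold Pre_solution; infer_instance

def pvWitness_solution : List String × List String × Int :=
  (["muzi", "frodo", "apeach", "neo"], ["muzi frodo", "apeach frodo", "frodo neo", "muzi neo", "apeach muzi", "muzi frodo"], 2)

def Spec_solution (id_list : List String) (report : List String) (k : Int) (out : List Int) : Prop := out = solution_alt id_list report k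
instance (id_list : List String) (report : List String) (k : Int) (out : List Int) : Decidable (Spec_solution id_list report k out) := by unfold Spec_solution; infer_instance

-- ===== CLAIM (what is proved, stated in full; the proofs are below) =====
def Claim_equal_solution : Prop := ∀ (id_list : List String) (report : List String) (k : Int), Dom_solution id_list report k → Pre_solution id_list report k → Spec_solution id_list report k (solution id_list report k)

-- ===== LEMMAS AND PROOFS =====

-- first and second token of a report entry (proof-only helpers)
def pvFa (s : String) : String := (PySem.Str.split₀ s).headD ""
def pvFb (s : String) : String := ((PySem.Str.split₀ s).drop 1).headD ""

theorem pv_split_eq_pair (s : String) (h : (PySem.Str.split₀ s).length = 2) :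
    PySem.Str.split₀ s = [pvFa s, pvFb s] := by
  unfold pvFa pvFb
  rcases e : PySem.Str.split₀ s with _ | ⟨a, _ | ⟨b, _ | ⟨c, t⟩⟩⟩ <;> rw [e] at h <;> simp_all

-- ===== VERDICT (by name: the statement is the Claim_ definition above) =====
theorem solution_spec : Claim_equal_solution := by
  intro id_list report k _ hpre
  unfold Spec_solution
  simp only [solution, solution_alt]
  have hded : PySem.List.dedup report = PySem.Set.ofList report := rfl
  rw [hded]
  set L := PySem.Set.ofList report with hL
  have h2 : ∀ i ∈ L, PySem.Str.split₀ i = [pvFa i, pvFb i] := by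
    intro i hi
    exact pv_split_eq_pair i (hpre i ((PySem.Set.mem_ofList _ _).1 hi))
  -- A's state fold splits into two independent folds
  have hstA :
      L.foldl
        (fun (st : PySem.Dict String (List String) × PySem.Dict String Int) i =>
          match PySem.Str.split₀ i with
          | [a, b] => (st.1.modify a [] (· ++ [b]), st.2.modify b 0 (· + 1))
          | _ => st)
        (PySem.Dict.empty, PySem.Dict.empty)
      = (L.foldl (fun d i => d.modify (pvFa i) [] (· ++ [pvFb i])) PySem.Dict.empty,
         L.foldl (fun d i => d.modify (pvFb i) 0 (· + 1)) PySem.Dict.empty) := by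
    have hstep :
        L.foldl
          (fun (st : PySem.Dict String (List String) × PySem.Dict String Int) i =>
            match PySem.Str.split₀ i with
            | [a, b] => (st.1.modify a [] (· ++ [b]), st.2.modify b 0 (· + 1))
            | _ => st)
          (PySem.Dict.empty, PySem.Dict.empty)
        = L.foldl
            (fun (st : PySem.Dict String (List String) × PySem.Dict String Int) i =>
              (st.1.modify (pvFa i) [] (· ++ [pvFb i]), st.2.modify (pvFb i) 0 (· + 1)))
            (PySem.Dict.empty, PySem.Dict.empty) :=
      PySem.List.foldl_congr_mem _ _ _ _ (by intro acc x hx; rw [h2 x hx])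
    rw [hstep]
    exact PySem.List.foldl_prod_mk
      (f := fun d i => PySem.Dict.modify d (pvFa i) [] (· ++ [pvFb i]))
      (g := fun d i => PySem.Dict.modify d (pvFb i) 0 (· + 1)) _ _ _
  rw [hstA]
  -- A's adjacency lookup
  have hrl : ∀ c, (L.foldl (fun d i => d.modify (pvFa i) [] (· ++ [pvFb i])) PySem.Dict.empty).getD c []
      = ((L.map (fun i => (pvFa i, pvFb i))).filter (fun p => p.1 == c)).map (·.2) := by
    intro c
    have hm : (L.map (fun i => (pvFa i, pvFb i))).foldl
        (fun (d : PySem.Dict String (List String)) p => d.modify p.1 [] (· ++ [p.2])) PySem.Dict.empty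
        = L.foldl (fun d i => d.modify (pvFa i) [] (· ++ [pvFb i])) PySem.Dict.empty := by
      rw [List.foldl_map]
    rw [← hm, PySem.Dict.getD_foldl_modify_append]
    simp [PySem.Dict.getD_empty]
  -- A's counter lookup
  have hrc : ∀ v, (L.foldl (fun d i => d.modify (pvFb i) 0 (· + 1)) PySem.Dict.empty).getD v 0
      = ((L.map pvFb).count v : Int) := by
    intro v
    have hm : (L.map pvFb).foldl (fun (d : PySem.Dict String Int) x => d.modify x 0 (· + 1)) PySem.Dict.empty
        = L.foldl (fun d i => d.modify (pvFb i) 0 (· + 1)) PySem.Dict.empty := by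
      rw [List.foldl_map]
    rw [← hm, PySem.Dict.getD_foldl_modify_add_one]
    simp [PySem.Dict.getD_empty]
  -- B's counter
  have hcntm : (L.map PySem.Str.split₀).foldl
      (fun (c : PySem.Dict String Int) e =>
        if e.length = 2 then c.insert (e.getD 1 "") (c.getD (e.getD 1 "") 0 + 1) else c) PySem.Dict.empty
      = (L.map pvFb).foldl (fun (c : PySem.Dict String Int) b => c.insert b (c.getD b 0 + 1)) PySem.Dict.empty := by
    rw [List.foldl_map, List.foldl_map]
    exact PySem.List.foldl_congr_mem _ _ _ _ (by intro acc x hx; rw [h2 x hx]; rfl)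
  set cnt := (L.map pvFb).foldl (fun (c : PySem.Dict String Int) b => c.insert b (c.getD b 0 + 1)) PySem.Dict.empty with hcntdef
  have hcg : ∀ v, cnt.getD v 0 = ((L.map pvFb).count v : Int) := by
    intro v
    rw [hcntdef, PySem.Dict.getD_foldl_insert_add_one]
    simp [PySem.Dict.getD_empty]
  have hknd : cnt.keys.Nodup := by
    rw [hcntdef]
    exact PySem.Dict.nodup_keys_foldl_insert _ _ _ (by simp)
  have hkeys : cnt.keys = PySem.Set.ofList (L.map pvFb) := by
    rw [hcntdef, PySem.Dict.keys_foldl_insert]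
    simp [PySem.Dict.keys_empty, PySem.Set.update, PySem.Set.ofList_eq_foldl]
  -- banned membership
  have hban : ∀ x, x ∈ (PySem.Set.ofList ((cnt.items.filter (fun p => decide (p.2 ≥ k))).map (·.1)) : List String)
      ↔ (x ∈ cnt.keys ∧ cnt.getD x 0 ≥ k) := by
    intro x
    rw [PySem.Set.mem_ofList]
    rw [PySem.Dict.items_eq_map_keys cnt hknd 0]
    simp only [List.map_map, List.filter_map, List.mem_map, List.mem_filter, Function.comp]
    constructor
    · rintro ⟨y, ⟨hy, hky⟩, rfl⟩
      exact ⟨hy, by simpa using hky⟩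
    · rintro ⟨hx, hk⟩
      exact ⟨x, ⟨hx, by simpa using hk⟩, rfl⟩
  -- mail
  have hmail : ∀ id, ((L.map PySem.Str.split₀).foldl
      (fun (m : PySem.Dict String Int) e =>
        if e.length = 2 then
          (if (PySem.Set.ofList ((cnt.items.filter (fun p => decide (p.2 ≥ k))).map (·.1)) : PySem.Set String).contains (e.getD 1 "")
           then m.insert (e.getD 0 "") (m.getD (e.getD 0 "") 0 + 1) else m)
        else m) PySem.Dict.empty).getD id 0
      = (((L.filter (fun i => decide (cnt.getD (pvFb i) 0 ≥ k))).map pvFa).count id : Int) := by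
    intro id
    rw [List.foldl_map]
    have hcm :
        L.foldl
          (fun (m : PySem.Dict String Int) i =>
            if (PySem.Str.split₀ i).length = 2 then
              (if (PySem.Set.ofList ((cnt.items.filter (fun p => decide (p.2 ≥ k))).map (·.1)) : PySem.Set String).contains ((PySem.Str.split₀ i).getD 1 "")
               then m.insert ((PySem.Str.split₀ i).getD 0 "") (m.getD ((PySem.Str.split₀ i).getD 0 "") 0 + 1) else m)
            else m)
          PySem.Dict.empty
        = L.foldl
            (fun (m : PySem.Dict String Int) i =>
              if cnt.getD (pvFb i) 0 ≥ k then m.insert (pvFa i) (m.getD (pvFa i) 0 + 1) else m)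
            PySem.Dict.empty :=
      PySem.List.foldl_congr_mem _ _ _ _ (by
        intro acc x hx
        rw [h2 x hx]
        have e0 : ([pvFa x, pvFb x] : List String).getD 0 "" = pvFa x := rfl
        have e1 : ([pvFa x, pvFb x] : List String).getD 1 "" = pvFb x := rfl
        rw [e0, e1]
        have hmem : pvFb x ∈ cnt.keys := by
          rw [hkeys, PySem.Set.mem_ofList]
          exact List.mem_map_of_mem hx
        by_cases h : cnt.getD (pvFb x) 0 ≥ k
        · have hmm : pvFb x ∈ (PySem.Set.ofList ((cnt.items.filter (fun p => decide (p.2 ≥ k))).map (·.1)) : List String) :=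
            (hban _).2 ⟨hmem, h⟩
          have hc : (PySem.Set.ofList ((cnt.items.filter (fun p => decide (p.2 ≥ k))).map (·.1)) : PySem.Set String).contains (pvFb x) = true := by
            simp only [PySem.Set.contains, List.contains_eq_any_beq, List.any_eq_true, beq_iff_eq]
            exact ⟨pvFb x, hmm, rfl⟩
          simp only [hc]
          simp [h]
        · have hc : (PySem.Set.ofList ((cnt.items.filter (fun p => decide (p.2 ≥ k))).map (·.1)) : PySem.Set String).contains (pvFb x) = false := by
            simp only [PySem.Set.contains, List.contains_eq_any_beq, List.any_eq_false, beq_iff_eq]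
            intro y hy
            rintro rfl
            exact h ((hban _).1 hy).2
          simp only [hc]
          simp [h])
    rw [hcm]
    rw [PySem.List.foldl_ite_eq_foldl_filter]
    have hm : ((L.filter (fun i => decide (cnt.getD (pvFb i) 0 ≥ k))).map pvFa).foldl
        (fun (m : PySem.Dict String Int) a => m.insert a (m.getD a 0 + 1)) PySem.Dict.empty
        = (L.filter (fun i => decide (cnt.getD (pvFb i) 0 ≥ k))).foldl
            (fun (m : PySem.Dict String Int) i => m.insert (pvFa i) (m.getD (pvFa i) 0 + 1)) PySem.Dict.empty := by
      rw [List.foldl_map]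
    rw [← hm, PySem.Dict.getD_foldl_insert_add_one]
    simp [PySem.Dict.getD_empty]
  rw [hcntm, PySem.List.foldl_append_singleton_eq_map]
  simp only [List.nil_append]
  refine List.map_congr_left ?_
  intro id _
  rw [hmail id, hrl id]
  rw [PySem.List.foldl_ite_add_one]
  rw [List.count_eq_countP, List.countP_map, List.countP_filter, List.countP_map, List.countP_map, List.countP_filter]
  norm_num
  refine List.countP_congr ?_
  intro x hx
  simp only [Function.comp]
  rw [hcg, hrc]
  simp [Bool.and_comm]
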